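-- pv_equiv track=rewrite | github.com/roniemartinez/latex2mathml | latex2mathml/aggregator.py | group_columns
-- ===== SOURCE A (Python) =====
-- from typing import Any, Iterator, List, NamedTuple, Optional, Tuple, Union
--
-- AMPERSAND = "&"
--
-- def group_columns(row: list) -> list:
--     grouped: List[Any] = [[]]
--     for item in row:
--         if item == AMPERSAND:
--             grouped.append([])
--         else:
--             grouped[-1].append(item)
--     return [item if len(item) > 1 else item.pop() for item in grouped]
-- ===== SOURCE B (Python) =====
-- AMPERSAND = "&"
--
--
-- def group_columns(row: list) -> list:
--     def split(r):
--         if AMPERSAND in r: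
--             i = r.index(AMPERSAND)
--             return [r[:i]] + split(r[i + 1:])
--         return [r]
--     return [seg if len(seg) > 1 else seg[0] for seg in split(row)]
-- ===== Notes on version B (the rewrite author's own statement) =====
-- stated objective: alternative
-- what changed: B recursively finds the first ampersand with index() and slices the row into a prefix segment plus a recursive split of the suffix, instead of A's single accumulating pass that appends each item into the last group.
-- outside the precondition, e.g. on group_columns(['a']): A returns ['a'], B returns ['a']; on group_columns(['a', '&', 'x', 'y']): A returns ['a', ['x', 'y']], B returns ['a', ['x', 'y']]
import Mathlib
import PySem

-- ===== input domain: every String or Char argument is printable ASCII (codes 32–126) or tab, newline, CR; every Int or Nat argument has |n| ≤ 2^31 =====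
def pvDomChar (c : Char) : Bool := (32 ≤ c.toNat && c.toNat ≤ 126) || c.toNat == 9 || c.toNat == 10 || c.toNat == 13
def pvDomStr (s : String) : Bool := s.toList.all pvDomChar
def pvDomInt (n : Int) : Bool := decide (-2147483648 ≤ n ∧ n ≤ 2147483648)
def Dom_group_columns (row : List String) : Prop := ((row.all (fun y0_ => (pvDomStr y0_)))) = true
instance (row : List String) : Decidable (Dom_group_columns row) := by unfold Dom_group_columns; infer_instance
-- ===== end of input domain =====

-- B splits the row by recursive find-first-ampersand-and-slice instead of A's single accumulating pass; alternative decomposition, same cost.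


-- ===== PORT A =====
-- grouped[-1].append(item): append x to the last group
def appendLast (x : String) : List (List String) → List (List String)
  | [] => []
  | [g] => [g ++ [x]]
  | g :: g2 :: gs => g :: appendLast x (g2 :: gs)

def group_columns (row : List String) : List (List String) :=
  let grouped := row.foldl (fun g item => if item == "&" then g ++ [[]] else appendLast item g) [[]]
  -- Python: [item if len(item) > 1 else item.pop() for item in grouped]; for a group of
  -- length 1 the Python value is a bare String (outside List String) and for length 0 it is
  -- an IndexError — both excluded by Pre_, so the else branch is never reached inside Pre_.
  grouped.map (fun item => if 1 < item.length then item else item)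

-- ===== PORT B =====
-- termination helper for split_amp, cited by name in decreasing_by
theorem split_amp_dec (r : List String) (i : Nat) (h : PySem.List.index? r "&" = some i) :
    (PySem.List.slice r (some ((i : Int) + 1)) none).length < r.length := by
  have hm : "&" ∈ r := (PySem.List.index?_isSome_iff r "&").mp (by rw [h]; rfl)
  have hc : ((i : Int) + 1) = (((i + 1 : Nat)) : Int) := by push_cast; ring
  rw [hc, PySem.List.slice_from_natCast]
  have h0 : 0 < r.length := List.length_pos_of_mem hm
  simp only [List.length_drop]
  omega

-- def split(r): if AMPERSAND in r: i = r.index(AMPERSAND); return [r[:i]] + split(r[i+1:]); return [r]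
-- (the membership test and r.index are fused via index?: 'AMPERSAND in r' ↔ index? returns some)
def split_amp (r : List String) : List (List String) :=
  match _h : PySem.List.index? r "&" with
  | some i =>
      [PySem.List.slice r none (some (i : Int))] ++
        split_amp (PySem.List.slice r (some ((i : Int) + 1)) none)
  | none => [r]
termination_by r.length
decreasing_by exact split_amp_dec r i _h

def group_columns_alt (row : List String) : List (List String) :=
  -- Python: [seg if len(seg) > 1 else seg[0] for seg in split(row)]; for length 1 the value
  -- is a bare String and for length 0 an IndexError — both excluded by Pre_.
  (split_amp row).map (fun seg => if 1 < seg.length then seg else seg)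

-- ===== PRECONDITION & SPEC =====
-- Pre_ excludes rows with an ampersand-delimited group of length 0 (both programs raise
-- IndexError) or length 1 (both return a bare string there, which is not a value of the
-- declared List (List String) type).
def Pre_group_columns (row : List String) : Prop :=
  ∀ g ∈ List.splitOn "&" row, 2 ≤ g.length
instance (row : List String) : Decidable (Pre_group_columns row) := by
  unfold Pre_group_columns; infer_instance

def pvWitness_group_columns : List String := ["x", "y", "&", "a", "b", "c"]

def Spec_group_columns (row : List String) (out : List (List String)) : Prop := out = group_columns_alt row
instance (row : List String) (out : List (List String)) : Decidable (Spec_group_columns row out) := by unfold Spec_group_columns; infer_instance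

-- ===== CLAIM (what is proved, stated in full; the proofs are below) =====
def Claim_equal_group_columns : Prop := ∀ (row : List String), Dom_group_columns row → Pre_group_columns row → Spec_group_columns row (group_columns row)

-- ===== LEMMAS AND PROOFS =====

-- prepend x to the first segment (segment list known nonempty)
def consHead (x : String) : List (List String) → List (List String)
  | [] => [[x]]
  | h :: t => (x :: h) :: t

-- replace the first segment h by cur ++ h
def attachHead (cur : List String) : List (List String) → List (List String)
  | [] => [cur]
  | h :: t => (cur ++ h) :: t

theorem split_amp_ne_nil (r : List String) : split_amp r ≠ [] := by
  unfold split_amp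
  split <;> simp

theorem split_amp_nil : split_amp [] = [[]] := by
  unfold split_amp
  split
  · rename_i i h
    rw [PySem.List.index?_eq_idxOf?] at h
    simp at h
  · rfl

theorem split_amp_cons_amp (xs : List String) :
    split_amp ("&" :: xs) = [] :: split_amp xs := by
  rw [split_amp]
  have h0 : PySem.List.index? ("&" :: xs) "&" = some 0 := PySem.List.index?_cons_self _ _
  split
  · rename_i i h
    rw [h0] at h
    cases h
    have h1 : ((0 : Nat) : Int) + 1 = ((1 : Nat) : Int) := by norm_num
    rw [h1, PySem.List.slice_from_natCast]
    simp [PySem.List.slice]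
  · rename_i h
    rw [h0] at h
    cases h

theorem split_amp_cons_ne (x : String) (xs : List String) (hx : x ≠ "&") :
    split_amp (x :: xs) = consHead x (split_amp xs) := by
  cases hj : PySem.List.index? xs "&" with
  | none =>
    have hn : PySem.List.index? (x :: xs) "&" = none := by
      rw [PySem.List.index?_cons_of_ne _ hx, hj]; rfl
    rw [split_amp]
    split
    · rename_i i h; rw [hn] at h; cases h
    · -- split_amp xs = [xs]
      rw [split_amp]
      split
      · rename_i i h; rw [hj] at h; cases h
      · rfl
  | some j =>
    have hs : PySem.List.index? (x :: xs) "&" = some (j + 1) := by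
      rw [PySem.List.index?_cons_of_ne _ hx, hj]; rfl
    -- left side
    rw [split_amp]
    split
    · rename_i i h
      rw [hs] at h
      cases h
      -- slices on x :: xs
      have e1 : PySem.List.slice (x :: xs) none (some ((j + 1 : Nat) : Int)) = x :: xs.take j := by
        rw [PySem.List.slice_to_natCast]; simp
      have e2 : PySem.List.slice (x :: xs) (some (((j + 1 : Nat) : Int) + 1)) none = xs.drop (j + 1) := by
        have : (((j + 1 : Nat) : Int) + 1) = ((j + 2 : Nat) : Int) := by push_cast; ring
        rw [this, PySem.List.slice_from_natCast]; rfl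
      rw [e1, e2]
      -- right side: split_amp xs one step
      conv_rhs => rw [split_amp]
      split
      · rename_i i h'
        rw [hj] at h'
        cases h'
        have e3 : PySem.List.slice xs none (some ((j : Nat) : Int)) = xs.take j := by
          rw [PySem.List.slice_to_natCast]
        have e4 : PySem.List.slice xs (some (((j : Nat) : Int) + 1)) none = xs.drop (j + 1) := by
          have : (((j : Nat) : Int) + 1) = ((j + 1 : Nat) : Int) := by push_cast; ring
          rw [this, PySem.List.slice_from_natCast]
        rw [e3, e4]
        simp [consHead]
      · rename_i h'
        rw [hj] at h'
        cases h'
    · rename_i h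
      rw [hs] at h
      cases h

theorem attachHead_nil_of_ne (l : List (List String)) (h : l ≠ []) : attachHead [] l = l := by
  cases l with
  | nil => exact absurd rfl h
  | cons a t => simp [attachHead]

theorem attachHead_consHead (cur : List String) (x : String) (l : List (List String)) :
    attachHead cur (consHead x l) = attachHead (cur ++ [x]) l := by
  cases l <;> simp [attachHead, consHead]

theorem appendLast_snoc (x : String) (pre : List (List String)) (cur : List String) :
    appendLast x (pre ++ [cur]) = pre ++ [cur ++ [x]] := by
  induction pre with
  | nil => simp [appendLast]
  | cons p ps ih => cases ps <;> simp_all [appendLast]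

theorem foldl_step_split (xs : List String) :
    ∀ (pre : List (List String)) (cur : List String),
      xs.foldl (fun g item => if item == "&" then g ++ [[]] else appendLast item g) (pre ++ [cur])
        = pre ++ attachHead cur (split_amp xs) := by
  induction xs with
  | nil =>
    intro pre cur
    simp [split_amp_nil, attachHead]
  | cons x xs ih =>
    intro pre cur
    by_cases hx : x = "&"
    · subst hx
      simp only [List.foldl_cons, beq_self_eq_true, if_pos]
      have : (pre ++ [cur]) ++ [([] : List String)] = (pre ++ [cur]) ++ [[]] := rfl
      rw [List.append_assoc] at this ⊢
      rw [← List.append_assoc, ih (pre ++ [cur]) []]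
      rw [split_amp_cons_amp, attachHead_nil_of_ne _ (split_amp_ne_nil xs)]
      simp [attachHead]
    · have hb : (x == "&") = false := by simp [hx]
      simp only [List.foldl_cons, hb, if_neg, Bool.false_eq_true, not_false_iff]
      rw [appendLast_snoc, ih pre (cur ++ [x])]
      rw [split_amp_cons_ne x xs hx, attachHead_consHead]

theorem grouped_eq_split (row : List String) :
    row.foldl (fun g item => if item == "&" then g ++ [[]] else appendLast item g) [[]]
      = split_amp row := by
  have := foldl_step_split row [] []
  simpa [attachHead_nil_of_ne _ (split_amp_ne_nil row)] using this

-- ===== VERDICT (by name: the statement is the Claim_ definition above) =====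
theorem group_columns_spec : Claim_equal_group_columns := by
  intro row _ _
  unfold Spec_group_columns group_columns group_columns_alt
  rw [grouped_eq_split]
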